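-- pv_equiv track=rewrite | github.com/GabbaTK/battle-ship | globalVars.py | shipDestroyedSurroundBlank
-- ===== SOURCE A (Python) =====
-- def shipDestroyedSurroundBlank(board, org, lenght, rotation):
--     if rotation == "h":
--         for y in range(org[0] - 1, org[0] + 2):
--             for x in range(org[1] - 1, org[1] + lenght + 1):
--                 if -1 < x < 10 and -1 < y < 10:
--                     if board[y][x] != "X":
--                         board[y][x] = "#"
--
--     elif rotation == "v":
--         for y in range(org[0] - 1, org[0] + lenght + 1):
--             for x in range(org[1] - 1, org[1] + 2):
--                 if -1 < x < 10 and -1 < y < 10: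
--                     if board[y][x] != "X":
--                         board[y][x] = "#"
--
--     return board
-- ===== SOURCE B (Python) =====
-- def shipDestroyedSurroundBlank(board, org, lenght, rotation):
--     # Returns a new board (A mutates in place; equivalence is about the return value).
--     if rotation == "h":
--         y0, y1, x0, x1 = org[0] - 1, org[0] + 1, org[1] - 1, org[1] + lenght
--     elif rotation == "v":
--         y0, y1, x0, x1 = org[0] - 1, org[0] + lenght, org[1] - 1, org[1] + 1
--     else:
--         return board
--     return [
--         [("#" if cell != "X" and y0 <= y <= y1 and x0 <= x <= x1 and y < 10 and x < 10
--           else cell)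
--          for x, cell in enumerate(row)]
--         for y, row in enumerate(board)]
-- ===== Notes on version B (the rewrite author's own statement) =====
-- stated objective: alternative
-- what changed: Instead of iterating over the surrounding rectangle and mutating board cells in place, B maps once over the whole board, testing each cell's coordinates for membership in the rectangle and building a fresh board; equivalence is about the return value (A mutates its argument, B does not).
-- outside the precondition, e.g. on shipDestroyedSurroundBlank([], [0], -2, 'v'): A returns [], B raises IndexError
import Mathlib
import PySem

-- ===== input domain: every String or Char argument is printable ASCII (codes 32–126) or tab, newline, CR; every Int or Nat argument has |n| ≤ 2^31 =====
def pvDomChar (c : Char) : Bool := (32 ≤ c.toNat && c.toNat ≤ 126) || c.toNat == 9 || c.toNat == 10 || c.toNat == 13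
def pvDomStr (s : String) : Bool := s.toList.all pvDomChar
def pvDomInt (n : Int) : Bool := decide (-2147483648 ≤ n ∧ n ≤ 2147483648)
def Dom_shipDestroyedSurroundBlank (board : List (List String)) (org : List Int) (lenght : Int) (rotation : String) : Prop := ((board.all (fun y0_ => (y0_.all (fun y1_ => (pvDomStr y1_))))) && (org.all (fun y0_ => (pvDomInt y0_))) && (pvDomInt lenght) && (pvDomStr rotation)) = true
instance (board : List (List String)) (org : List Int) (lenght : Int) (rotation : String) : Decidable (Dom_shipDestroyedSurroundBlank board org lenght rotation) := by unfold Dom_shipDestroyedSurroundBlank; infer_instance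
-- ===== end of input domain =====

-- B rebuilds the board by a single coordinate-tested map instead of mutating the
-- rectangle in place (alternative decomposition, same cost class); the proved
-- equivalence is about the RETURN value only — Python A mutates its argument, B does not.

-- ===== PORT A =====
-- one execution of A's loop body for coordinates (y, x): the guard, the read
-- board[y][x] (pyGet?; none = IndexError, outside Pre_) and the write board[y][x] = "#"
def pvMarkA (b : List (List String)) (y x : Int) : List (List String) :=
  if -1 < x ∧ x < 10 ∧ -1 < y ∧ y < 10 then
    match PySem.List.pyGet? b y with
    | some row =>
      match PySem.List.pyGet? row x with
      | some cell => if cell ≠ "X" then b.set y.toNat (row.set x.toNat "#") else b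
      | none => b      -- Python raises IndexError here (excluded by Pre_)
    | none => b        -- Python raises IndexError here (excluded by Pre_)
  else b

-- A's two nested for-loops over ranges of y and x
def pvLoopA (b : List (List String)) (ys xs : List Int) : List (List String) :=
  ys.foldl (fun b' y => xs.foldl (fun b'' x => pvMarkA b'' y x) b') b

def shipDestroyedSurroundBlank (board : List (List String)) (org : List Int) (lenght : Int) (rotation : String) : List (List String) :=
  -- org[0] / org[1]; pyGet? none = IndexError in Python, excluded by Pre_ (default 0 is never relied on inside Pre_)
  let o0 : Int := (PySem.List.pyGet? org 0).getD 0
  let o1 : Int := (PySem.List.pyGet? org 1).getD 0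
  if rotation = "h" then
    pvLoopA board (PySem.List.pyRange (o0 - 1) (o0 + 2) 1) (PySem.List.pyRange (o1 - 1) (o1 + lenght + 1) 1)
  else if rotation = "v" then
    pvLoopA board (PySem.List.pyRange (o0 - 1) (o0 + lenght + 1) 1) (PySem.List.pyRange (o1 - 1) (o1 + 2) 1)
  else board

-- ===== PORT B =====
-- B's nested comprehension: map over enumerate(board) / enumerate(row) testing rectangle membership
def pvMarkRect (b : List (List String)) (y0 y1 x0 x1 : Int) : List (List String) :=
  (PySem.List.enumerate b 0).map (fun yr =>
    (PySem.List.enumerate yr.2 0).map (fun xc =>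
      if xc.2 ≠ "X" ∧ y0 ≤ yr.1 ∧ yr.1 ≤ y1 ∧ x0 ≤ xc.1 ∧ xc.1 ≤ x1 ∧ yr.1 < 10 ∧ xc.1 < 10
      then "#" else xc.2))

def shipDestroyedSurroundBlank_alt (board : List (List String)) (org : List Int) (lenght : Int) (rotation : String) : List (List String) :=
  let o0 : Int := (PySem.List.pyGet? org 0).getD 0
  let o1 : Int := (PySem.List.pyGet? org 1).getD 0
  if rotation = "h" then pvMarkRect board (o0 - 1) (o0 + 1) (o1 - 1) (o1 + lenght)
  else if rotation = "v" then pvMarkRect board (o0 - 1) (o0 + lenght) (o1 - 1) (o1 + 1)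
  else board

-- ===== PRECONDITION & SPEC =====
-- the rectangle A's loops cover under rotation "h" / "v"
def pvInRect (org : List Int) (lenght : Int) (rotation : String) (y x : Int) : Bool :=
  let o0 : Int := (PySem.List.pyGet? org 0).getD 0
  let o1 : Int := (PySem.List.pyGet? org 1).getD 0
  if rotation = "h" then decide (o0 - 1 ≤ y ∧ y ≤ o0 + 1 ∧ o1 - 1 ≤ x ∧ x ≤ o1 + lenght)
  else decide (o0 - 1 ≤ y ∧ y ≤ o0 + lenght ∧ o1 - 1 ≤ x ∧ x ≤ o1 + 1)

-- Pre_ = the inputs on which Python A returns: under rotation "h"/"v" it needs org[0] and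
-- org[1] and every board cell it visits (rectangle ∩ [0,10)²) to exist.  The only inputs
-- excluded on which A still RETURNS: org of length 1 under rotation "v" with an empty outer
-- range, where A's loop never reads org[1] and returns the board untouched while B reads
-- org[1] up front and raises IndexError (see cites).
def Pre_shipDestroyedSurroundBlank (board : List (List String)) (org : List Int) (lenght : Int) (rotation : String) : Prop :=
  (rotation = "h" ∨ rotation = "v") →
    2 ≤ org.length ∧
    ∀ y ∈ PySem.List.pyRange 0 10 1, ∀ x ∈ PySem.List.pyRange 0 10 1,
      pvInRect org lenght rotation y x = true →
      y.toNat < board.length ∧ x.toNat < (board.getD y.toNat []).length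

instance (board : List (List String)) (org : List Int) (lenght : Int) (rotation : String) : Decidable (Pre_shipDestroyedSurroundBlank board org lenght rotation) := by
  unfold Pre_shipDestroyedSurroundBlank; infer_instance

def pvWitness_shipDestroyedSurroundBlank : List (List String) × List Int × Int × String :=
  ([["O", "O"], ["O", "X"]], [0, 0], 1, "h")

def Spec_shipDestroyedSurroundBlank (board : List (List String)) (org : List Int) (lenght : Int) (rotation : String) (out : List (List String)) : Prop := out = shipDestroyedSurroundBlank_alt board org lenght rotation
instance (board : List (List String)) (org : List Int) (lenght : Int) (rotation : String) (out : List (List String)) : Decidable (Spec_shipDestroyedSurroundBlank board org lenght rotation out) := by unfold Spec_shipDestroyedSurroundBlank; infer_instance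

-- ===== CLAIM (what is proved, stated in full; the proofs are below) =====
def Claim_equal_shipDestroyedSurroundBlank : Prop := ∀ (board : List (List String)) (org : List Int) (lenght : Int) (rotation : String), Dom_shipDestroyedSurroundBlank board org lenght rotation → Pre_shipDestroyedSurroundBlank board org lenght rotation → Spec_shipDestroyedSurroundBlank board org lenght rotation (shipDestroyedSurroundBlank board org lenght rotation)

-- ===== LEMMAS AND PROOFS =====

-- the cell of a nested list at row i, column j (proof-only view of the board)
def pvCell (b : List (List String)) (i j : Nat) : Option String :=
  b[i]?.bind (fun r => r[j]?)

theorem pvMarkA_cell (b : List (List String)) (y x : Int) (i j : Nat) :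
    pvCell (pvMarkA b y x) i j =
      (pvCell b i j).map (fun c =>
        if ((i : Int) = y ∧ (j : Int) = x ∧ y < 10 ∧ x < 10 ∧ c ≠ "X") then "#" else c) := by
  unfold pvMarkA
  split
  case isTrue hg =>
    obtain ⟨hx0, hx10, hy0, hy10⟩ := hg
    rw [PySem.List.pyGet?_of_nonneg b (by omega)]
    cases hrow : b[y.toNat]? with
    | none =>
      by_cases hi : i = y.toNat
      · subst hi; simp [pvCell, hrow]
      · simp only [pvCell]
        cases hbi : b[i]? with
        | none => simp
        | some r =>
          have : (i : Int) ≠ y := by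
            intro h; apply hi; omega
          simp only [Option.bind_some]
          cases hrj : r[j]? with
          | none => simp
          | some c => simp [this]
    | some row =>
      dsimp only
      rw [show PySem.List.pyGet? row x = row[x.toNat]? from PySem.List.pyGet?_of_nonneg row (by omega)]
      cases hcell : row[x.toNat]? with
      | none =>
        by_cases hij : i = y.toNat ∧ j = x.toNat
        · obtain ⟨hi, hj⟩ := hij; subst hi; subst hj; simp [pvCell, hrow, hcell]
        · simp only [pvCell]
          cases hbi : b[i]? with
          | none => simp
          | some r =>
            simp only [Option.bind_some]
            cases hrj : r[j]? with
            | none => simp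
            | some c =>
              have : ¬((i : Int) = y ∧ (j : Int) = x) := by
                intro ⟨h1, h2⟩; exact hij ⟨by omega, by omega⟩
              simp only [Option.map_some]
              rw [if_neg (by tauto)]
      | some cell =>
        dsimp only
        by_cases hX : cell ≠ "X"
        · rw [if_pos hX]
          by_cases hi : i = y.toNat
          · subst hi
            simp only [pvCell, List.getElem?_set_self (by exact (List.getElem?_eq_some_iff.mp hrow).1 ), hrow, Option.bind_some]
            by_cases hj : j = x.toNat
            · subst hj
              rw [List.getElem?_set_self (by exact (List.getElem?_eq_some_iff.mp hcell).1), hcell,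
                Option.map_some, if_pos ⟨by omega, by omega, by omega, by omega, hX⟩]
            · rw [List.getElem?_set_ne (by omega)]
              cases hrj : row[j]? with
              | none => simp
              | some c =>
                have : ¬((j:Int) = x) := by omega
                simp [this]
          · simp only [pvCell]
            rw [List.getElem?_set_ne (show y.toNat ≠ i by omega)]
            cases hbi : b[i]? with
            | none => simp
            | some r =>
              simp only [Option.bind_some]
              cases hrj : r[j]? with
              | none => simp
              | some c =>
                have : ¬((i:Int) = y) := by omega
                simp [this]
        · rw [if_neg hX]
          rw [not_not] at hX
          subst hX
          simp only [pvCell]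
          cases hbi : b[i]? with
          | none => simp
          | some r =>
            simp only [Option.bind_some]
            cases hrj : r[j]? with
            | none => simp
            | some c =>
              by_cases hij : (i:Int) = y ∧ (j:Int) = x
              · obtain ⟨h1,h2⟩ := hij
                have hi : i = y.toNat := by omega
                have hj : j = x.toNat := by omega
                subst hi; subst hj
                rw [hrow] at hbi; cases hbi
                rw [hcell] at hrj; cases hrj
                simp
              · simp only [Option.map_some]
                rw [if_neg (by tauto)]
  case isFalse hg =>
    simp only [pvCell]
    cases hbi : b[i]? with
    | none => simp
    | some r =>
      simp only [Option.bind_some]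
      cases hrj : r[j]? with
      | none => simp
      | some c =>
        simp only [Option.map_some]
        rw [if_neg (by intro ⟨h1,h2,h3,h4,_⟩; apply hg; refine ⟨by omega, by omega, by omega, by omega⟩)]

theorem pvMarkA_rowlen (b : List (List String)) (y x : Int) (i : Nat) :
    ((pvMarkA b y x)[i]?).map List.length = (b[i]?).map List.length := by
  unfold pvMarkA
  split
  case isTrue hg =>
    obtain ⟨hx0, hx10, hy0, hy10⟩ := hg
    rw [PySem.List.pyGet?_of_nonneg b (by omega)]
    cases hrow : b[y.toNat]? with
    | none => rfl
    | some row =>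
      dsimp only
      cases PySem.List.pyGet? row x with
      | none => rfl
      | some cell =>
        dsimp only
        split
        · by_cases hiy : y.toNat = i
          · subst hiy
            rw [List.getElem?_set_self (List.getElem?_eq_some_iff.mp hrow).1, hrow]
            simp
          · rw [List.getElem?_set_ne hiy]
        · rfl
  case isFalse => rfl

theorem pvFoldX_cell (y : Int) (xs : List Int) (b : List (List String)) (i j : Nat) :
    pvCell (xs.foldl (fun b'' x => pvMarkA b'' y x) b) i j =
      (pvCell b i j).map (fun c =>
        if ((i : Int) = y ∧ (j : Int) ∈ xs ∧ y < 10 ∧ (j : Int) < 10 ∧ c ≠ "X") then "#" else c) := by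
  induction xs generalizing b with
  | nil =>
    simp only [List.foldl_nil, List.not_mem_nil, false_and, and_false, if_false]
    cases pvCell b i j <;> simp
  | cons x xs ih =>
    rw [List.foldl_cons, ih, pvMarkA_cell, Option.map_map]
    cases hc : pvCell b i j with
    | none => rfl
    | some c =>
      simp only [Option.map_some, Function.comp]
      congr 1
      have hH : ("#" : String) ≠ "X" := by decide
      by_cases hX : c = "X"
      · subst hX
        simp
      · simp only [List.mem_cons]
        by_cases hC1 : (i : Int) = y ∧ (j : Int) = x ∧ y < 10 ∧ x < 10 ∧ c ≠ "X"
        · obtain ⟨h1, h2, h3, h4, h5⟩ := hC1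
          have t1 : (if ((i : Int) = y ∧ (j : Int) = x ∧ y < 10 ∧ x < 10 ∧ c ≠ "X") then ("#" : String) else c) = "#" :=
            if_pos ⟨h1, h2, h3, h4, h5⟩
          rw [t1, ite_self,
            if_pos (show (i : Int) = y ∧ ((j : Int) = x ∨ (j : Int) ∈ xs) ∧ y < 10 ∧ (j : Int) < 10 ∧ c ≠ "X" from
              ⟨h1, Or.inl h2, h3, by omega, h5⟩)]
        · rw [if_neg hC1]
          refine if_congr ?_ rfl rfl
          constructor
          · rintro ⟨h1, h2, h3, h4, h5⟩
            exact ⟨h1, Or.inr h2, h3, h4, h5⟩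
          · rintro ⟨h1, h2 | h2, h3, h4, h5⟩
            · exact absurd ⟨h1, h2, h3, by omega, h5⟩ hC1
            · exact ⟨h1, h2, h3, h4, h5⟩

theorem pvFoldX_rowlen (y : Int) (xs : List Int) (b : List (List String)) (i : Nat) :
    ((xs.foldl (fun b'' x => pvMarkA b'' y x) b)[i]?).map List.length = (b[i]?).map List.length := by
  induction xs generalizing b with
  | nil => rfl
  | cons x xs ih => rw [List.foldl_cons, ih, pvMarkA_rowlen]

theorem pvLoopA_rowlen (b : List (List String)) (ys xs : List Int) (i : Nat) :
    ((pvLoopA b ys xs)[i]?).map List.length = (b[i]?).map List.length := by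
  unfold pvLoopA
  induction ys generalizing b with
  | nil => rfl
  | cons y ys ih => rw [List.foldl_cons, ih, pvFoldX_rowlen]

theorem pvLoopA_cell (b : List (List String)) (ys xs : List Int) (i j : Nat) :
    pvCell (pvLoopA b ys xs) i j =
      (pvCell b i j).map (fun c =>
        if ((i : Int) ∈ ys ∧ (j : Int) ∈ xs ∧ (i : Int) < 10 ∧ (j : Int) < 10 ∧ c ≠ "X") then "#" else c) := by
  unfold pvLoopA
  induction ys generalizing b with
  | nil =>
    simp only [List.foldl_nil, List.not_mem_nil, false_and, if_false]
    cases pvCell b i j <;> simp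
  | cons y ys ih =>
    rw [List.foldl_cons, ih, pvFoldX_cell, Option.map_map]
    cases hc : pvCell b i j with
    | none => rfl
    | some c =>
      simp only [Option.map_some, Function.comp]
      congr 1
      have hH : ("#" : String) ≠ "X" := by decide
      by_cases hX : c = "X"
      · subst hX
        simp
      · simp only [List.mem_cons]
        by_cases hC1 : (i : Int) = y ∧ (j : Int) ∈ xs ∧ y < 10 ∧ (j : Int) < 10 ∧ c ≠ "X"
        · obtain ⟨h1, h2, h3, h4, h5⟩ := hC1
          have t1 : (if ((i : Int) = y ∧ (j : Int) ∈ xs ∧ y < 10 ∧ (j : Int) < 10 ∧ c ≠ "X") then ("#" : String) else c) = "#" :=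
            if_pos ⟨h1, h2, h3, h4, h5⟩
          rw [t1, ite_self,
            if_pos (show ((i : Int) = y ∨ (i : Int) ∈ ys) ∧ (j : Int) ∈ xs ∧ (i : Int) < 10 ∧ (j : Int) < 10 ∧ c ≠ "X" from
              ⟨Or.inl h1, h2, by omega, h4, h5⟩)]
        · rw [if_neg hC1]
          refine if_congr ?_ rfl rfl
          constructor
          · rintro ⟨h1, h2, h3, h4, h5⟩
            exact ⟨Or.inr h1, h2, h3, h4, h5⟩
          · rintro ⟨h1 | h1, h2, h3, h4, h5⟩
            · exact absurd ⟨h1, h2, by omega, h4, h5⟩ hC1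
            · exact ⟨h1, h2, h3, h4, h5⟩

theorem pvMarkRect_get (b : List (List String)) (y0 y1 x0 x1 : Int) (i : Nat) :
    (pvMarkRect b y0 y1 x0 x1)[i]? = (b[i]?).map (fun row =>
      (PySem.List.enumerate row 0).map (fun xc =>
        if xc.2 ≠ "X" ∧ y0 ≤ (i : Int) ∧ (i : Int) ≤ y1 ∧ x0 ≤ xc.1 ∧ xc.1 ≤ x1 ∧ (i : Int) < 10 ∧ xc.1 < 10
        then "#" else xc.2)) := by
  unfold pvMarkRect
  rw [List.getElem?_map, PySem.List.getElem?_enumerate]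
  cases b[i]? <;> simp

theorem pvMarkRect_rowlen (b : List (List String)) (y0 y1 x0 x1 : Int) (i : Nat) :
    ((pvMarkRect b y0 y1 x0 x1)[i]?).map List.length = (b[i]?).map List.length := by
  rw [pvMarkRect_get]
  cases b[i]? <;> simp [PySem.List.length_enumerate]

theorem pvMarkRect_cell (b : List (List String)) (y0 y1 x0 x1 : Int) (i j : Nat) :
    pvCell (pvMarkRect b y0 y1 x0 x1) i j =
      (pvCell b i j).map (fun c =>
        if (c ≠ "X" ∧ y0 ≤ (i : Int) ∧ (i : Int) ≤ y1 ∧ x0 ≤ (j : Int) ∧ (j : Int) ≤ x1 ∧ (i : Int) < 10 ∧ (j : Int) < 10)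
        then "#" else c) := by
  unfold pvCell
  rw [pvMarkRect_get]
  cases b[i]? with
  | none => rfl
  | some row =>
    simp only [Option.map_some, Option.bind_some]
    rw [List.getElem?_map, PySem.List.getElem?_enumerate]
    cases row[j]? <;> simp

theorem pvEqOfCell (L R : List (List String))
    (hrow : ∀ i : Nat, (L[i]?).map List.length = (R[i]?).map List.length)
    (hcell : ∀ i j, pvCell L i j = pvCell R i j) : L = R := by
  apply List.ext_getElem?
  intro i
  cases hLi : L[i]? with
  | none =>
    cases hRi : R[i]? with
    | none => rfl
    | some r =>
      have := hrow i
      rw [hLi, hRi] at this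
      cases this
  | some l =>
    cases hRi : R[i]? with
    | none =>
      have := hrow i
      rw [hLi, hRi] at this
      cases this
    | some r =>
      have hl : l = r := by
        apply List.ext_getElem?
        intro j
        have := hcell i j
        simp only [pvCell, hLi, hRi, Option.bind_some] at this
        exact this
      rw [hl]

theorem pvMain (b : List (List String)) (y0 y1 x0 x1 : Int) :
    pvLoopA b (PySem.List.pyRange y0 (y1 + 1) 1) (PySem.List.pyRange x0 (x1 + 1) 1) = pvMarkRect b y0 y1 x0 x1 := by
  apply pvEqOfCell
  · intro i
    rw [pvLoopA_rowlen, pvMarkRect_rowlen]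
  · intro i j
    rw [pvLoopA_cell, pvMarkRect_cell]
    cases hc : pvCell b i j with
    | none => rfl
    | some c =>
      simp only [Option.map_some, PySem.List.mem_pyRange_one]
      congr 1
      refine if_congr ?_ rfl rfl
      constructor
      · rintro ⟨⟨a1, a2⟩, ⟨b1, b2⟩, c1, c2, d⟩
        exact ⟨d, a1, by omega, b1, by omega, c1, c2⟩
      · rintro ⟨d, a1, a2, b1, b2, c1, c2⟩
        exact ⟨⟨a1, by omega⟩, ⟨b1, by omega⟩, c1, c2, d⟩

theorem pvWitness_ok :
    Dom_shipDestroyedSurroundBlank (pvWitness_shipDestroyedSurroundBlank.1) (pvWitness_shipDestroyedSurroundBlank.2.1) (pvWitness_shipDestroyedSurroundBlank.2.2.1) (pvWitness_shipDestroyedSurroundBlank.2.2.2) ∧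
    Pre_shipDestroyedSurroundBlank (pvWitness_shipDestroyedSurroundBlank.1) (pvWitness_shipDestroyedSurroundBlank.2.1) (pvWitness_shipDestroyedSurroundBlank.2.2.1) (pvWitness_shipDestroyedSurroundBlank.2.2.2) := by
  decide

-- ===== VERDICT (by name: the statement is the Claim_ definition above) =====
theorem shipDestroyedSurroundBlank_spec : Claim_equal_shipDestroyedSurroundBlank := by
  intro board org lenght rotation _ _
  show shipDestroyedSurroundBlank board org lenght rotation = shipDestroyedSurroundBlank_alt board org lenght rotation
  unfold shipDestroyedSurroundBlank shipDestroyedSurroundBlank_alt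
  dsimp only
  by_cases h1 : rotation = "h"
  · rw [if_pos h1, if_pos h1,
      show ((PySem.List.pyGet? org 0).getD 0) + 2 = (((PySem.List.pyGet? org 0).getD 0) + 1) + 1 from by ring,
      show ((PySem.List.pyGet? org 1).getD 0) + lenght + 1 = (((PySem.List.pyGet? org 1).getD 0) + lenght) + 1 from rfl]
    exact pvMain board _ _ _ _
  · rw [if_neg h1, if_neg h1]
    by_cases h2 : rotation = "v"
    · rw [if_pos h2, if_pos h2,
        show ((PySem.List.pyGet? org 0).getD 0) + lenght + 1 = (((PySem.List.pyGet? org 0).getD 0) + lenght) + 1 from rfl,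
        show ((PySem.List.pyGet? org 1).getD 0) + 2 = (((PySem.List.pyGet? org 1).getD 0) + 1) + 1 from by ring]
      exact pvMain board _ _ _ _
    · rw [if_neg h2, if_neg h2]
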